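-- pv_equiv track=rewrite | github.com/serhattsnmz/rsa-math | rsa-math.py | get_decryption_keys
-- ===== SOURCE A (Python) =====
-- def get_decryption_keys(e, phi, start = 1, finish=1000):
--     keys = []
--     for i in range (1000):
--         for i in range(phi + start, phi + finish):
--             if i * e % phi == 1:
--                 keys.append(i)
--         if len(keys) >= 5:
--             break
--         else:
--             start += 1000
--             finish += 1000
--     return keys
-- ===== SOURCE B (Python) =====
-- def get_decryption_keys(e, phi, start=1, finish=1000):
--     # Modular inverse by extended Euclid, then enumerate the arithmetic
--     # progression of solutions inside each scanned window.
--     if phi <= 1: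
--         return []          # i*e % phi is never 1 when phi <= 1
--     old_r, r = e % phi, phi
--     old_s, s = 1, 0
--     while r != 0:
--         q = old_r // r
--         old_r, r = r, old_r - q * r
--         old_s, s = s, old_s - q * s
--     if old_r != 1:
--         return []          # e has no inverse mod phi: no key exists
--     d = old_s % phi        # unique solution of i*e % phi == 1 in [0, phi)
--     keys = []
--     for _ in range(1000):
--         lo, hi = phi + start, phi + finish
--         first = lo + (d - lo) % phi     # least solution >= lo
--         keys.extend(range(first, hi, phi))
--         if len(keys) >= 5:
--             break
--         start += 1000
--         finish += 1000
--     return keys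
-- ===== Notes on version B (the rewrite author's own statement) =====
-- stated objective: faster
-- what changed: Instead of testing i*e % phi == 1 for every integer of up to 1000 scanned windows, B computes the modular inverse d of e mod phi once by the extended Euclidean algorithm and extends the key list with the arithmetic progression congruent to d intersected with each window.
import Mathlib
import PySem

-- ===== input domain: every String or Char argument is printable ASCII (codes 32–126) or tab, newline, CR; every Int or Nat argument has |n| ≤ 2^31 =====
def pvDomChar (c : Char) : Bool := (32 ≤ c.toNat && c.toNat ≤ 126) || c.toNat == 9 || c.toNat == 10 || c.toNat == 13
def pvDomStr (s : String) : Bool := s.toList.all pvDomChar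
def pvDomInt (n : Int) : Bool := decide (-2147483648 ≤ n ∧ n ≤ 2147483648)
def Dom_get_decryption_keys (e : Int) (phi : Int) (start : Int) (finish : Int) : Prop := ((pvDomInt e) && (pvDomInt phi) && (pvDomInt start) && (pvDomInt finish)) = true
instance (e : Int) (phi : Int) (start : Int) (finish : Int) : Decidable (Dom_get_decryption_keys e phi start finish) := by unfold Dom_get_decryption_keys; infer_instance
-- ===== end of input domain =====

-- B replaces A's brute-force scan of every window element by an extended-Euclid
-- modular inverse plus direct enumeration of the arithmetic progression of
-- solutions inside each window (objective: faster).

-- ===== PORT A =====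
-- inner 'for i in range(phi+start, phi+finish): if i*e % phi == 1: keys.append(i)'
-- (the range loop as an index recursion; appends gathered in a reversed
-- accumulator, the standard constant-time rendering of list.append)
def pverAScanGo (e phi hi : Int) (i : Int) (racc : List Int) : List Int :=
  if h : i < hi then
    pverAScanGo e phi hi (i + 1) (if PySem.Int.mod (i * e) phi = 1 then i :: racc else racc)
  else racc
termination_by (hi - i).toNat
decreasing_by omega

def pverAScan (e phi lo hi : Int) (keys : List Int) : List Int :=
  keys ++ (pverAScanGo e phi hi lo []).reverse

-- outer 'for i in range(1000): … if len(keys) >= 5: break else: start += 1000; finish += 1000'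
def pverALoop (e phi : Int) : Nat → Int → Int → List Int → List Int
  | 0, _, _, keys => keys
  | n + 1, start, finish, keys =>
    let keys2 := pverAScan e phi (phi + start) (phi + finish) keys
    if 5 ≤ keys2.length then keys2
    else pverALoop e phi n (start + 1000) (finish + 1000) keys2

def get_decryption_keys (e : Int) (phi : Int) (start : Int) (finish : Int) : List Int :=
  pverALoop e phi 1000 start finish []

-- ===== PORT B =====
-- the 'while r != 0' extended-Euclid loop of Source B (the fuel only makes the
-- recursion total: r strictly decreases, so fuel = phi.toNat + 1 never runs out)
def pverEgcd : Nat → Int → Int → Int → Int → Int × Int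
  | 0, old_r, _, old_s, _ => (old_r, old_s)
  | fuel + 1, old_r, r, old_s, s =>
    if r = 0 then (old_r, old_s)
    else
      pverEgcd fuel r (old_r - PySem.Int.floordiv old_r r * r)
        s (old_s - PySem.Int.floordiv old_r r * s)

-- the 'for _ in range(1000)' loop of Source B: extend by the progression in the window
def pverBLoop (phi d : Int) : Nat → Int → Int → List Int → List Int
  | 0, _, _, keys => keys
  | n + 1, start, finish, keys =>
    let lo := phi + start
    let hi := phi + finish
    let keys2 := keys ++ PySem.List.pyRange (lo + PySem.Int.mod (d - lo) phi) hi phi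
    if 5 ≤ keys2.length then keys2
    else pverBLoop phi d n (start + 1000) (finish + 1000) keys2

def get_decryption_keys_alt (e : Int) (phi : Int) (start : Int) (finish : Int) : List Int :=
  if phi ≤ 1 then []
  else if (pverEgcd (phi.toNat + 1) (PySem.Int.mod e phi) phi 1 0).1 ≠ 1 then []
  else pverBLoop phi (PySem.Int.mod (pverEgcd (phi.toNat + 1) (PySem.Int.mod e phi) phi 1 0).2 phi)
    1000 start finish []

-- ===== PRECONDITION & SPEC =====
-- Pre_ excludes exactly the inputs where A raises ZeroDivisionError:
-- phi = 0 together with a nonempty window (start < finish).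
def Pre_get_decryption_keys (e : Int) (phi : Int) (start : Int) (finish : Int) : Prop :=
  phi ≠ 0 ∨ finish ≤ start
instance (e : Int) (phi : Int) (start : Int) (finish : Int) : Decidable (Pre_get_decryption_keys e phi start finish) := by unfold Pre_get_decryption_keys; infer_instance

def pvWitness_get_decryption_keys : Int × Int × Int × Int := (3, 10, 1, 50)

def Spec_get_decryption_keys (e : Int) (phi : Int) (start : Int) (finish : Int) (out : List Int) : Prop := out = get_decryption_keys_alt e phi start finish
instance (e : Int) (phi : Int) (start : Int) (finish : Int) (out : List Int) : Decidable (Spec_get_decryption_keys e phi start finish out) := by unfold Spec_get_decryption_keys; infer_instance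

-- ===== CLAIM (what is proved, stated in full; the proofs are below) =====
def Claim_equal_get_decryption_keys : Prop := ∀ (e : Int) (phi : Int) (start : Int) (finish : Int), Dom_get_decryption_keys e phi start finish → Pre_get_decryption_keys e phi start finish → Spec_get_decryption_keys e phi start finish (get_decryption_keys e phi start finish)

-- ===== LEMMAS AND PROOFS =====

-- extended-Euclid invariant: the first component is a common nonnegative divisor
-- of the pair, and the second is a Bézout coefficient for it
theorem pverEgcd_spec (fuel : Nat) : ∀ (old_r r old_s s : Int), 0 ≤ old_r → 0 ≤ r →
    r.toNat < fuel →
    0 ≤ (pverEgcd fuel old_r r old_s s).1 ∧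
    (pverEgcd fuel old_r r old_s s).1 ∣ old_r ∧ (pverEgcd fuel old_r r old_s s).1 ∣ r ∧
    ∀ (a m : Int), a * old_s ≡ old_r [ZMOD m] → a * s ≡ r [ZMOD m] →
      a * (pverEgcd fuel old_r r old_s s).2 ≡ (pverEgcd fuel old_r r old_s s).1 [ZMOD m] := by
  induction fuel with
  | zero => intro old_r r old_s s _ h2 h3; omega
  | succ fuel ih =>
    intro old_r r old_s s h1 h2 h3
    by_cases hr : r = 0
    · subst hr
      simp only [pverEgcd, if_pos rfl]
      exact ⟨h1, dvd_refl _, dvd_zero _, fun a m hA _ => hA⟩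
    · have hrpos : 0 < r := lt_of_le_of_ne h2 (Ne.symm hr)
      have hq : PySem.Int.floordiv old_r r = old_r / r := PySem.Int.floordiv_eq_ediv_of_pos hrpos
      have hnew : old_r - PySem.Int.floordiv old_r r * r = old_r % r := by
        rw [hq, Int.emod_def]; ring
      have hnn : 0 ≤ old_r % r := Int.emod_nonneg old_r hr
      have hlt : old_r % r < r := Int.emod_lt_of_pos old_r hrpos
      have hih := ih r (old_r - PySem.Int.floordiv old_r r * r) s
        (old_s - PySem.Int.floordiv old_r r * s) h2 (by omega) (by rw [hnew]; omega)
      obtain ⟨hg0, hd1, hd2, hbez⟩ := hih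
      simp only [pverEgcd, if_neg hr]
      refine ⟨hg0, ?_, hd1, ?_⟩
      · have h := dvd_add hd2 (hd1.mul_left (PySem.Int.floordiv old_r r))
        have h2 : old_r - PySem.Int.floordiv old_r r * r + PySem.Int.floordiv old_r r * r = old_r := by
          ring
        rwa [h2] at h
      · intro a m hA hB
        apply hbez a m hB
        have hrw : a * (old_s - PySem.Int.floordiv old_r r * s)
            = a * old_s - PySem.Int.floordiv old_r r * (a * s) := by ring
        rw [hrw]
        exact hA.sub (hB.mul_left _)

-- for phi > 1 with e*d ≡ 1 (mod phi) and 0 ≤ d < phi, the tested condition is a congruence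
theorem pverCond_iff (e phi d : Int) (hphi : 1 < phi) (hd0 : 0 ≤ d) (hd1 : d < phi)
    (he : e * d ≡ 1 [ZMOD phi]) (i : Int) :
    PySem.Int.mod (i * e) phi = 1 ↔ i % phi = d := by
  have h0 : (0:Int) < phi := by omega
  rw [PySem.Int.mod_eq_emod_of_pos h0]
  constructor
  · intro h
    have hie : i * e ≡ 1 [ZMOD phi] := by
      show (i * e) % phi = 1 % phi
      rw [h, Int.emod_eq_of_lt (by omega) (by omega)]
    have hid : i ≡ d [ZMOD phi] := by
      calc i = i * 1 := by ring
        _ ≡ i * (e * d) [ZMOD phi] := (he.mul_left i).symm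
        _ = (i * e) * d := by ring
        _ ≡ 1 * d [ZMOD phi] := hie.mul_right d
        _ = d := by ring
    have : i % phi = d % phi := hid
    rwa [Int.emod_eq_of_lt hd0 hd1] at this
  · intro h
    have hid : i ≡ d [ZMOD phi] := by
      show i % phi = d % phi
      rw [h, Int.emod_eq_of_lt hd0 hd1]
    have hie : i * e ≡ 1 [ZMOD phi] := by
      calc i * e ≡ d * e [ZMOD phi] := hid.mul_right e
        _ = e * d := by ring
        _ ≡ 1 [ZMOD phi] := he
    have hfin : (i * e) % phi = 1 % phi := hie
    have h1p : (1:Int) % phi = 1 := Int.emod_eq_of_lt (by omega) (by omega)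
    rw [h1p] at hfin
    exact hfin

-- pyRange with positive step is strictly increasing
theorem pverProg_pairwise (a b s : Int) (hs : 0 < s) :
    (PySem.List.pyRange a b s).Pairwise (· < ·) := by
  rw [PySem.List.pyRange_of_pos a b hs, List.pairwise_map]
  refine List.Pairwise.imp ?_ List.pairwise_lt_range
  intro k k' h
  have hk : (k : Int) < (k' : Int) := by exact_mod_cast h
  nlinarith

-- the scan loop collects (reversed) exactly the filtered range
theorem pverAScanGo_eq (e phi hi : Int) : ∀ (k : Nat) (i : Int) (racc : List Int),
    (hi - i).toNat = k →
    pverAScanGo e phi hi i racc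
      = (List.filter (fun x => decide (PySem.Int.mod (x * e) phi = 1))
          (PySem.List.pyRange i hi 1)).reverse ++ racc := by
  intro k
  induction k with
  | zero =>
    intro i racc hk
    rw [pverAScanGo, dif_neg (by omega), PySem.List.pyRange_one_eq_nil (by omega)]
    simp
  | succ k ih =>
    intro i racc hk
    have hlt : i < hi := by omega
    rw [pverAScanGo, dif_pos hlt, ih (i + 1) _ (by omega), PySem.List.pyRange_one_cons hlt,
      List.filter_cons]
    by_cases hp : PySem.Int.mod (i * e) phi = 1
    · simp [hp]
    · simp [hp]

-- hence a scan is 'keys ++ the filtered window'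
theorem pverAScan_eq (e phi lo hi : Int) (keys : List Int) :
    pverAScan e phi lo hi keys
      = keys ++ List.filter (fun x => decide (PySem.Int.mod (x * e) phi = 1))
          (PySem.List.pyRange lo hi 1) := by
  unfold pverAScan
  rw [pverAScanGo_eq e phi hi (hi - lo).toNat lo [] rfl]
  simp

-- one window: A's filtered scan is exactly the arithmetic progression B appends
theorem pverWindow (e phi d : Int) (hphi : 1 < phi) (hd0 : 0 ≤ d) (hd1 : d < phi)
    (he : e * d ≡ 1 [ZMOD phi]) (lo hi : Int) (keys : List Int) :
    pverAScan e phi lo hi keys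
      = keys ++ PySem.List.pyRange (lo + PySem.Int.mod (d - lo) phi) hi phi := by
  have h0 : (0:Int) < phi := by omega
  rw [pverAScan_eq]
  congr 1
  have hm0 : 0 ≤ PySem.Int.mod (d - lo) phi := PySem.Int.mod_nonneg _ h0
  have hm1 : PySem.Int.mod (d - lo) phi < phi := PySem.Int.mod_lt _ h0
  have hfd : lo + PySem.Int.mod (d - lo) phi ≡ d [ZMOD phi] := by
    calc lo + PySem.Int.mod (d - lo) phi = lo + (d - lo) % phi := by
          rw [PySem.Int.mod_eq_emod_of_pos h0]
      _ ≡ lo + (d - lo) [ZMOD phi] := Int.ModEq.add_left lo (Int.emod_emod_of_dvd _ dvd_rfl)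
      _ = d := by ring
  have hmem : ∀ x : Int,
      x ∈ List.filter (fun x => decide (PySem.Int.mod (x * e) phi = 1)) (PySem.List.pyRange lo hi 1)
        ↔ x ∈ PySem.List.pyRange (lo + PySem.Int.mod (d - lo) phi) hi phi := by
    intro x
    rw [List.mem_filter, PySem.List.mem_pyRange_iff_of_pos h0 x]
    simp only [PySem.List.mem_pyRange_one, decide_eq_true_eq]
    rw [pverCond_iff e phi d hphi hd0 hd1 he x]
    constructor
    · rintro ⟨⟨hlo, hhi⟩, hx⟩
      have hxd : x ≡ d [ZMOD phi] := by
        show x % phi = d % phi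
        rw [hx, Int.emod_eq_of_lt hd0 hd1]
      have hdvd : phi ∣ x - (lo + PySem.Int.mod (d - lo) phi) := (hfd.trans hxd.symm).dvd
      refine ⟨?_, hhi, hdvd⟩
      obtain ⟨k, hk⟩ := hdvd
      by_contra hlt
      push_neg at hlt
      have hk1 : k ≤ -1 := by nlinarith
      nlinarith
    · rintro ⟨hfx, hhi, hdvd⟩
      have hxf : x ≡ lo + PySem.Int.mod (d - lo) phi [ZMOD phi] :=
        (Int.modEq_iff_dvd.mpr hdvd).symm
      have hxd : x % phi = d % phi := hxf.trans hfd
      rw [Int.emod_eq_of_lt hd0 hd1] at hxd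
      exact ⟨⟨by omega, hhi⟩, hxd⟩
  have hnd1 : (List.filter (fun x => decide (PySem.Int.mod (x * e) phi = 1))
      (PySem.List.pyRange lo hi 1)).Nodup := (PySem.List.nodup_pyRange_one lo hi).filter _
  have hpw2 := pverProg_pairwise (lo + PySem.Int.mod (d - lo) phi) hi phi h0
  have hnd2 : (PySem.List.pyRange (lo + PySem.Int.mod (d - lo) phi) hi phi).Nodup :=
    hpw2.nodup
  have hperm := (List.perm_ext_iff_of_nodup hnd1 hnd2).mpr hmem
  haveI : IsAntisymm Int (· < ·) := ⟨fun a b h1 h2 => absurd h2 (not_lt.mpr h1.le)⟩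
  exact hperm.eq_of_pairwise (fun a b _ _ h1 h2 => absurd h2 (not_lt.mpr h1.le))
    ((PySem.List.pairwise_lt_pyRange_one lo hi).filter _) hpw2

-- if the condition never holds, a scan adds nothing
theorem pverAScan_nil (e phi : Int) (h : ∀ i : Int, ¬ PySem.Int.mod (i * e) phi = 1)
    (lo hi : Int) (keys : List Int) : pverAScan e phi lo hi keys = keys := by
  rw [pverAScan_eq]
  have hf : List.filter (fun x => decide (PySem.Int.mod (x * e) phi = 1))
      (PySem.List.pyRange lo hi 1) = [] := by
    rw [List.filter_eq_nil_iff]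
    intro a _
    simp [h a]
  rw [hf, List.append_nil]

theorem pverALoop_nil (e phi : Int) (h : ∀ i : Int, ¬ PySem.Int.mod (i * e) phi = 1) :
    ∀ (n : Nat) (start finish : Int), pverALoop e phi n start finish [] = [] := by
  intro n
  induction n with
  | zero => intro start finish; rfl
  | succ n ih =>
    intro start finish
    simp only [pverALoop, pverAScan_nil e phi h, List.length_nil]
    norm_num
    exact ih _ _

theorem pverALoop_empty (e phi : Int) :
    ∀ (n : Nat) (start finish : Int), finish ≤ start → pverALoop e phi n start finish [] = [] := by
  intro n
  induction n with
  | zero => intro start finish _; rfl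
  | succ n ih =>
    intro start finish hle
    have hscan : pverAScan e phi (phi + start) (phi + finish) [] = [] := by
      rw [pverAScan_eq, PySem.List.pyRange_one_eq_nil (by omega)]
      rfl
    simp only [pverALoop, hscan, List.length_nil]
    norm_num
    exact ih _ _ (by omega)

theorem pverLoop_eq (e phi d : Int) (hphi : 1 < phi) (hd0 : 0 ≤ d) (hd1 : d < phi)
    (he : e * d ≡ 1 [ZMOD phi]) :
    ∀ (n : Nat) (start finish : Int) (keys : List Int),
      pverALoop e phi n start finish keys = pverBLoop phi d n start finish keys := by
  intro n
  induction n with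
  | zero => intro start finish keys; rfl
  | succ n ih =>
    intro start finish keys
    simp only [pverALoop, pverBLoop, pverWindow e phi d hphi hd0 hd1 he]
    split_ifs with hlen
    · rfl
    · exact ih _ _ _

-- ===== VERDICT (by name: the statement is the Claim_ definition above) =====
theorem get_decryption_keys_spec : Claim_equal_get_decryption_keys := by
  intro e phi start finish _ hpre
  unfold Spec_get_decryption_keys get_decryption_keys get_decryption_keys_alt
  by_cases hphi : phi ≤ 1
  · rw [if_pos hphi]
    rcases lt_trichotomy phi 0 with hneg | hzero | hpos
    · apply pverALoop_nil
      intro i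
      have := PySem.Int.mod_neg_bounds (i * e) hneg
      omega
    · subst hzero
      rcases hpre with h | h
      · exact absurd rfl h
      · exact pverALoop_empty e 0 1000 start finish h
    · have h1 : phi = 1 := by omega
      subst h1
      apply pverALoop_nil
      intro i
      have ha := PySem.Int.mod_nonneg (i * e) (by norm_num : (0:Int) < 1)
      have hb := PySem.Int.mod_lt (i * e) (by norm_num : (0:Int) < 1)
      omega
  · push_neg at hphi
    rw [if_neg (by omega)]
    have h0 : (0:Int) < phi := by omega
    have hmodeq : PySem.Int.mod e phi = e % phi := PySem.Int.mod_eq_emod_of_pos h0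
    rw [hmodeq]
    obtain ⟨hg0, hgd1, hgd2, hbez⟩ := pverEgcd_spec (phi.toNat + 1) (e % phi) phi 1 0
      (Int.emod_nonneg e (by omega)) (le_of_lt h0) (by omega)
    have hinv1 : e * 1 ≡ e % phi [ZMOD phi] := by
      rw [mul_one]
      show e % phi = e % phi % phi
      exact (Int.emod_emod_of_dvd e dvd_rfl).symm
    have hinv2 : e * 0 ≡ phi [ZMOD phi] := by
      show (e * 0) % phi = phi % phi
      simp [Int.emod_self]
    by_cases hg : (pverEgcd (phi.toNat + 1) (e % phi) phi 1 0).1 = 1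
    · rw [if_neg (by simpa using hg)]
      have hbez1 : e * (pverEgcd (phi.toNat + 1) (e % phi) phi 1 0).2 ≡ 1 [ZMOD phi] := by
        have := hbez e phi hinv1 hinv2
        rwa [hg] at this
      have hd0 : 0 ≤ PySem.Int.mod (pverEgcd (phi.toNat + 1) (e % phi) phi 1 0).2 phi :=
        PySem.Int.mod_nonneg _ h0
      have hd1 : PySem.Int.mod (pverEgcd (phi.toNat + 1) (e % phi) phi 1 0).2 phi < phi :=
        PySem.Int.mod_lt _ h0
      have hed : e * PySem.Int.mod (pverEgcd (phi.toNat + 1) (e % phi) phi 1 0).2 phi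
          ≡ 1 [ZMOD phi] := by
        have hdm : PySem.Int.mod (pverEgcd (phi.toNat + 1) (e % phi) phi 1 0).2 phi
            ≡ (pverEgcd (phi.toNat + 1) (e % phi) phi 1 0).2 [ZMOD phi] := by
          rw [PySem.Int.mod_eq_emod_of_pos h0]
          show _ % phi % phi = _ % phi
          exact Int.emod_emod_of_dvd _ dvd_rfl
        exact (hdm.mul_left e).trans hbez1
      exact pverLoop_eq e phi _ hphi hd0 hd1 hed 1000 start finish []
    · rw [if_pos (by simpa using hg)]
      apply pverALoop_nil
      intro i hcon
      rw [PySem.Int.mod_eq_emod_of_pos h0] at hcon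
      have hie : i * e ≡ 1 [ZMOD phi] := by
        show (i * e) % phi = 1 % phi
        rw [hcon, Int.emod_eq_of_lt (by omega) (by omega)]
      obtain ⟨k, hk⟩ := hie.dvd
      have hdve : (pverEgcd (phi.toNat + 1) (e % phi) phi 1 0).1 ∣ e := by
        have h := dvd_add (hgd2.mul_right (e / phi)) hgd1
        rwa [Int.ediv_add_emod e phi] at h
      have hdv1 : (pverEgcd (phi.toNat + 1) (e % phi) phi 1 0).1 ∣ 1 := by
        have h := dvd_add (hdve.mul_left i) (hgd2.mul_right k)
        rwa [show i * e + phi * k = 1 by omega] at h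
      exact hg (Int.eq_one_of_dvd_one hg0 hdv1)
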